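-- pv_equiv track=rewrite | github.com/spack/spack | lib/spack/spack/compiler.py | tokenize_flags
-- ===== SOURCE A (Python) =====
-- def tokenize_flags(flags_str):
--     """Given a compiler flag specification as a string, this returns a list
--        where the entries are the flags. For compiler options which set values
--        using the syntax "-flag value", this function groups flags and their
--        values together. Any token not preceded by a "-" is considered the
--        value of a prior flag."""
--     tokens = flags_str.split()
--     if not tokens:
--         return []
--     flag = tokens[0]
--     flags = []
--     for token in tokens[1:]:
--         if not token.startswith('-'):
--             flag += ' ' + token
--         else:
--             flags.append(flag)
--             flag = token
--     flags.append(flag)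
--     return flags
-- ===== SOURCE B (Python) =====
-- def tokenize_flags(flags_str):
--     """Single reverse pass: collect each group as a list of tokens (a token
--     starting with '-' closes the group), then join each group with spaces."""
--     cur = []
--     groups = []
--     for tok in reversed(flags_str.split()):
--         if tok.startswith('-'):
--             groups = [' '.join([tok] + cur)] + groups
--             cur = []
--         else:
--             cur = [tok] + cur
--     if cur:
--         groups = [' '.join(cur)] + groups
--     return groups
-- ===== Notes on version B (the rewrite author's own statement) =====
-- stated objective: alternative
-- what changed: Replaces the forward running-string accumulator with a single reverse pass that collects each flag group as a token list (closed when a '-'-token is reached) and joins each group with spaces.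
import Mathlib
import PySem

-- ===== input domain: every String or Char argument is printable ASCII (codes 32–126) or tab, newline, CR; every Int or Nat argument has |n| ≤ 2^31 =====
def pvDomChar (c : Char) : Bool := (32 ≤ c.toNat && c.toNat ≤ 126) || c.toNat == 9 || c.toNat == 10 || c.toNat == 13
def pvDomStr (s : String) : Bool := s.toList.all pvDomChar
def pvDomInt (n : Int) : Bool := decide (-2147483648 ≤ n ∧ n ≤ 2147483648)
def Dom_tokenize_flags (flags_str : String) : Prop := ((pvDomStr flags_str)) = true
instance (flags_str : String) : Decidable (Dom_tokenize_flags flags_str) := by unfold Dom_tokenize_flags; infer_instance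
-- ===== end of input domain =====

-- B replaces A's forward running-string accumulator with a reverse pass that
-- collects each flag group as a token list and joins it; same O(n) cost.


-- ===== PORT A =====
def tokenize_flags (flags_str : String) : List String :=
  let tokens := PySem.Str.split₀ flags_str
  match tokens with
  | [] => []
  | t0 :: rest =>
      let st := rest.foldl (fun (st : String × List String) token =>
        if PySem.Str.startswith token "-" = false then (st.1 ++ " " ++ token, st.2)
        else (token, st.2 ++ [st.1])) (t0, ([] : List String))
      st.2 ++ [st.1]

-- ===== PORT B =====
def tokenize_flags_alt (flags_str : String) : List String :=
  let st := (PySem.Str.split₀ flags_str).foldr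
    (fun tok (st : List String × List String) =>
      if PySem.Str.startswith tok "-" then ([], PySem.Str.join " " (tok :: st.1) :: st.2)
      else (tok :: st.1, st.2)) (([] : List String), ([] : List String))
  if st.1 = [] then st.2 else PySem.Str.join " " st.1 :: st.2

-- ===== PRECONDITION & SPEC =====
def Spec_tokenize_flags (flags_str : String) (out : List String) : Prop := out = tokenize_flags_alt flags_str
instance (flags_str : String) (out : List String) : Decidable (Spec_tokenize_flags flags_str out) := by unfold Spec_tokenize_flags; infer_instance

-- ===== CLAIM (what is proved, stated in full; the proofs are below) =====
def Claim_equal_tokenize_flags : Prop := ∀ (flags_str : String), Dom_tokenize_flags flags_str → Spec_tokenize_flags flags_str (tokenize_flags flags_str)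

-- ===== LEMMAS AND PROOFS =====

-- grouping spec: gs flag ts = the groups of (flag's group extended by ts)
def gs (flag : String) : List String → List String
  | [] => [flag]
  | t :: ts => if PySem.Str.startswith t "-" then flag :: gs t ts else gs (flag ++ " " ++ t) ts

def ga : List String → List String
  | [] => []
  | t :: ts => gs t ts

theorem join_singleton_str (a : String) : PySem.Str.join " " [a] = a := by
  apply String.toList_injective
  simp [PySem.Str.toList_join, PySem.Chars.join_singleton]

theorem join_merge (a b : String) (l : List String) :
    PySem.Str.join " " ((a ++ " " ++ b) :: l) = PySem.Str.join " " (a :: b :: l) := by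
  apply String.toList_injective
  cases l with
  | nil =>
      simp [PySem.Str.toList_join, PySem.Chars.join_singleton, PySem.Chars.join_cons_cons]
  | cons c l' =>
      simp [PySem.Str.toList_join, PySem.Chars.join_cons_cons]

theorem lemA (ts : List String) : ∀ (flag : String) (acc : List String),
    (ts.foldl (fun (st : String × List String) token =>
        if PySem.Str.startswith token "-" = false then (st.1 ++ " " ++ token, st.2)
        else (token, st.2 ++ [st.1])) (flag, acc)).2 ++
      [(ts.foldl (fun (st : String × List String) token =>
        if PySem.Str.startswith token "-" = false then (st.1 ++ " " ++ token, st.2)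
        else (token, st.2 ++ [st.1])) (flag, acc)).1] = acc ++ gs flag ts := by
  induction ts with
  | nil => intro flag acc; simp [gs]
  | cons t ts ih =>
      intro flag acc
      by_cases hs : PySem.Str.startswith t "-" = true
      · simp only [List.foldl_cons]
        rw [if_neg (by rw [hs]; simp)]
        rw [ih]
        simp only [gs]
        rw [if_pos hs]
        simp
      · have hs' : PySem.Str.startswith t "-" = false := by
          revert hs; cases PySem.Str.startswith t "-" <;> simp
        simp only [List.foldl_cons]
        rw [if_pos (by rw [hs'])]
        rw [ih]
        simp only [gs]
        rw [if_neg (by rw [hs']; simp)]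

theorem lemGL (ts : List String) : ∀ (t : String),
    gs t ts = PySem.Str.join " " (t :: ts.takeWhile (fun u => !PySem.Str.startswith u "-")) ::
      ga (ts.dropWhile (fun u => !PySem.Str.startswith u "-")) := by
  induction ts with
  | nil => intro t; simp only [gs, ga, List.takeWhile_nil, List.dropWhile_nil, join_singleton_str]
  | cons u us ih =>
      intro t
      by_cases h : PySem.Str.startswith u "-" = true
      · simp only [gs]
        rw [if_pos h]
        simp only [List.takeWhile_cons, List.dropWhile_cons]
        rw [if_neg (by rw [h]; simp), if_neg (by rw [h]; simp)]
        simp only [ga, join_singleton_str]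
      · have h' : PySem.Str.startswith u "-" = false := by
          revert h; cases PySem.Str.startswith u "-" <;> simp
        simp only [gs]
        rw [if_neg (by rw [h']; simp)]
        rw [ih (t ++ " " ++ u)]
        simp only [List.takeWhile_cons, List.dropWhile_cons]
        rw [if_pos (by rw [h']; simp), if_pos (by rw [h']; simp)]
        rw [join_merge]

theorem lemB (ts : List String) :
    (ts.foldr (fun tok (st : List String × List String) =>
        if PySem.Str.startswith tok "-" then ([], PySem.Str.join " " (tok :: st.1) :: st.2)
        else (tok :: st.1, st.2)) (([] : List String), ([] : List String))) =
      (ts.takeWhile (fun u => !PySem.Str.startswith u "-"),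
       ga (ts.dropWhile (fun u => !PySem.Str.startswith u "-"))) := by
  induction ts with
  | nil => simp [ga]
  | cons t ts ih =>
      by_cases h : PySem.Str.startswith t "-" = true
      · simp only [List.foldr_cons, ih]
        rw [if_pos h]
        simp only [List.takeWhile_cons, List.dropWhile_cons]
        rw [if_neg (by rw [h]; simp), if_neg (by rw [h]; simp)]
        simp only [ga, Prod.mk.injEq]
        exact ⟨trivial, (lemGL ts t).symm⟩
      · have h' : PySem.Str.startswith t "-" = false := by
          revert h; cases PySem.Str.startswith t "-" <;> simp
        simp only [List.foldr_cons, ih]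
        rw [if_neg (by rw [h']; simp)]
        simp only [List.takeWhile_cons, List.dropWhile_cons]
        rw [if_pos (by rw [h']; simp), if_pos (by rw [h']; simp)]

-- ===== VERDICT (by name: the statement is the Claim_ definition above) =====
theorem tokenize_flags_spec : Claim_equal_tokenize_flags := by
  intro flags_str _
  unfold Spec_tokenize_flags tokenize_flags tokenize_flags_alt
  cases htok : PySem.Str.split₀ flags_str with
  | nil => simp
  | cons t ts =>
      simp only [lemB, lemA, List.nil_append]
      by_cases h : PySem.Str.startswith t "-" = true
      · simp only [List.takeWhile_cons, List.dropWhile_cons, h, Bool.not_true,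
          Bool.false_eq_true, if_false]
        simp only [if_true, ga]
      · have h' : PySem.Str.startswith t "-" = false := by
          revert h; cases PySem.Str.startswith t "-" <;> simp
        simp only [List.takeWhile_cons, List.dropWhile_cons, h', Bool.not_false]
        simp only [if_true]
        rw [if_neg (by simp)]
        exact lemGL ts t
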